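-- pv_equiv track=rewrite | github.com/nhamidn/alx-interview | 0x0A-primegame/0-prime_game.py | isWinner
-- ===== SOURCE A (Python) =====
-- class PrimeCache:
--     def __init__(self):
--         self.primes = []
--         self.max_checked = 1
--
--     def update_primes(self, end):
--         """Update the list of primes up to the end if not already done."""
--         if end > self.max_checked:
--             for num in range(max(2, self.max_checked + 1), end + 1):
--                 if all(num % p != 0 for p in self.primes if p * p <= num):
--                     self.primes.append(num)
--             self.max_checked = end
--
--     def get_prime_count(self, n):
--         """Return the number of primes up to n."""
--         self.update_primes(n)
--         return sum(1 for p in self.primes if p <= n)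
--
-- def isWinner(x, nums):
--     """Function that solves the prime game problem."""
--     prime_cache = PrimeCache()
--     maria_wins = 0
--     ben_wins = 0
--
--     for n in range(x):
--         prime_count = prime_cache.get_prime_count(nums[n])
--
--         if prime_count % 2 == 0:
--             ben_wins += 1
--         else:
--             maria_wins += 1
--
--     if maria_wins > ben_wins:
--         return "Maria"
--     elif ben_wins > maria_wins:
--         return "Ben"
--     else:
--         return None
-- ===== SOURCE B (Python) =====
-- def isWinner(x, nums):
--     """Prime game: precompute a prefix table of prime counts once, O(1) per round."""
--     queries = nums[:x] if x > 0 else []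
--     if not queries:
--         return None
--     m = max(queries)
--     pc = [0, 0]
--     cnt = 0
--     for i in range(2, m + 1):
--         if _is_prime(i):
--             cnt += 1
--         pc.append(cnt)
--     maria = sum(1 for n in queries if n >= 2 and pc[n] % 2 == 1)
--     ben = len(queries) - maria
--     if maria > ben:
--         return "Maria"
--     if ben > maria:
--         return "Ben"
--     return None
--
--
-- def _is_prime(n):
--     if n < 2:
--         return False
--     d = 2
--     while d * d <= n:
--         if n % d == 0:
--             return False
--         d += 1
--     return True
-- ===== Notes on version B (the rewrite author's own statement) =====
-- stated objective: faster
-- what changed: Replaces A's incremental prime cache, which re-scans the whole prime list to count primes for every round, by a single pass that builds a prefix table of prime counts up to max(nums[:x]) once and answers each round with an O(1) table lookup.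
import Mathlib
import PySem

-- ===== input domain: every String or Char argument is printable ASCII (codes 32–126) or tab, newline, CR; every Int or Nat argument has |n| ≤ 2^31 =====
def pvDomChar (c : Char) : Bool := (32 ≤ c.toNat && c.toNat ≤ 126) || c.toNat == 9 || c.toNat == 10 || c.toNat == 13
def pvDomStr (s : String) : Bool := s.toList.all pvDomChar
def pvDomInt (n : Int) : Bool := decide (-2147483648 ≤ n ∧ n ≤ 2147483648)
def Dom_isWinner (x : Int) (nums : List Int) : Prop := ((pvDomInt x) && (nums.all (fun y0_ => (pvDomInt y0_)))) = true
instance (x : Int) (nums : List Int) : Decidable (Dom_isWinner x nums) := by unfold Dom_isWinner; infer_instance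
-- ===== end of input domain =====

-- B replaces A's incremental prime cache (re-scanned in full for every round) by one
-- prefix table of prime counts, making each round an O(1) lookup: measurably faster.

-- ===== PORT A =====
-- PrimeCache.update_primes: cache state is (primes, max_checked)
def pvUpdatePrimes (primes : List Int) (maxChecked endv : Int) : List Int × Int :=
  if endv > maxChecked then
    ((PySem.List.pyRange (max 2 (maxChecked + 1)) (endv + 1) 1).foldl
      (fun ps num =>
        if (ps.filter (fun p => decide (p * p ≤ num))).all
            (fun p => PySem.Int.mod num p != 0)
        then ps ++ [num] else ps) primes, endv)
  else (primes, maxChecked)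

-- PrimeCache.get_prime_count
def pvGetPrimeCount (primes : List Int) (maxChecked n : Int) : (List Int × Int) × Int :=
  let s := pvUpdatePrimes primes maxChecked n
  (s, ((s.1.filter (fun p => decide (p ≤ n))).length : Int))

def isWinner (x : Int) (nums : List Int) : Option String :=
  let fin := (PySem.List.pyRange 0 x 1).foldl
    (fun (st : (List Int × Int) × Int × Int) n =>
      let r := pvGetPrimeCount st.1.1 st.1.2 (PySem.List.pyGetD nums n 0)
      if PySem.Int.mod r.2 2 == 0 then (r.1, st.2.1, st.2.2 + 1)
      else (r.1, st.2.1 + 1, st.2.2))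
    (([], 1), 0, 0)
  if fin.2.1 > fin.2.2 then some "Maria"
  else if fin.2.2 > fin.2.1 then some "Ben"
  else none

-- ===== PORT B =====
-- _is_prime's while loop (the structural fuel only makes the loop total; n.toNat steps always suffice)
def pvIsPrimeGo (n : Int) : Nat → Int → Bool
  | 0, _ => true
  | fuel + 1, d =>
    if d * d ≤ n then
      if PySem.Int.mod n d == 0 then false
      else pvIsPrimeGo n fuel (d + 1)
    else true

def pvIsPrime (n : Int) : Bool := if n < 2 then false else pvIsPrimeGo n n.toNat 2

def isWinner_alt (x : Int) (nums : List Int) : Option String :=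
  let queries := if x > 0 then PySem.List.slice nums none (some x) else []
  if queries.isEmpty then none
  else
    let m := (PySem.List.max? queries (fun y => y)).getD 0
    let t := (PySem.List.pyRange 2 (m + 1) 1).foldl
      (fun (st : List Int × Int) i =>
        let cnt := if pvIsPrime i then st.2 + 1 else st.2
        (st.1 ++ [cnt], cnt)) ([0, 0], 0)
    let maria : Int := (queries.filter
      (fun n => decide (2 ≤ n) && (PySem.Int.mod (PySem.List.pyGetD t.1 n 0) 2 == 1))).length
    let ben : Int := (queries.length : Int) - maria
    if maria > ben then some "Maria"
    else if ben > maria then some "Ben"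
    else none

-- ===== PRECONDITION & SPEC =====
-- Pre_ excludes exactly the inputs where A raises IndexError: x larger than len(nums).
def Pre_isWinner (x : Int) (nums : List Int) : Prop := x ≤ (nums.length : Int)
instance (x : Int) (nums : List Int) : Decidable (Pre_isWinner x nums) := by
  unfold Pre_isWinner; infer_instance

def pvWitness_isWinner : Int × List Int := (4, [3, 5, 7, 10])

def Spec_isWinner (x : Int) (nums : List Int) (out : Option String) : Prop := out = isWinner_alt x nums
instance (x : Int) (nums : List Int) (out : Option String) : Decidable (Spec_isWinner x nums out) := by unfold Spec_isWinner; infer_instance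

-- ===== CLAIM (what is proved, stated in full; the proofs are below) =====
def Claim_equal_isWinner : Prop := ∀ (x : Int) (nums : List Int), Dom_isWinner x nums → Pre_isWinner x nums → Spec_isWinner x nums (isWinner x nums)

-- ===== LEMMAS AND PROOFS =====
def primesUpTo (M : Int) : List Int :=
  ((List.range (M.toNat + 1)).filter (fun k => decide (Nat.Prime k))).map (fun (k : ℕ) => (k : Int))
def pcRef (n : Int) : Int :=
  (((List.range (n.toNat + 1)).filter (fun k => decide (Nat.Prime k))).length : Int)

theorem primesUpTo_succ (e : Int) (he : 0 ≤ e) :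
    primesUpTo (e + 1) = primesUpTo e ++ (if Nat.Prime (e + 1).toNat then [e + 1] else []) := by
  unfold primesUpTo
  have h1 : (e + 1).toNat + 1 = (e.toNat + 1) + 1 := by omega
  rw [h1, List.range_succ, List.filter_append, List.map_append]
  congr 1
  have h3 : (e + 1).toNat = e.toNat + 1 := by omega
  by_cases hp : Nat.Prime (e.toNat + 1)
  · simp [hp, h3]; omega
  · simp [hp, h3]

theorem pcRef_succ (e : Int) (he : 0 ≤ e) :
    pcRef (e + 1) = pcRef e + (if Nat.Prime (e + 1).toNat then 1 else 0) := by
  unfold pcRef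
  have h1 : (e + 1).toNat + 1 = (e.toNat + 1) + 1 := by omega
  rw [h1, List.range_succ, List.filter_append, List.length_append]
  have h3 : (e + 1).toNat = e.toNat + 1 := by omega
  by_cases hp : Nat.Prime (e.toNat + 1) <;> simp [hp, h3]

theorem pcRef_lt_two (n : Int) (h : n < 2) : pcRef n = 0 := by
  unfold pcRef
  have : n.toNat = 0 ∨ n.toNat = 1 := by omega
  rcases this with h | h <;>
    simp [h, List.range_succ, Nat.not_prime_zero, Nat.not_prime_one]

theorem length_primesUpTo (M : Int) : ((primesUpTo M).length : Int) = pcRef M := by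
  simp [primesUpTo, pcRef]

theorem mem_primesUpTo {M p : Int} :
    p ∈ primesUpTo M ↔ 0 ≤ p ∧ p ≤ M ∧ Nat.Prime p.toNat := by
  unfold primesUpTo
  rw [List.mem_map]
  constructor
  · rintro ⟨k, hk, rfl⟩
    rw [List.mem_filter, List.mem_range] at hk
    obtain ⟨hk1, hpk⟩ := hk
    rw [decide_eq_true_eq] at hpk
    have h2 := hpk.two_le
    exact ⟨by omega, by omega, by simpa using hpk⟩
  · rintro ⟨h0, hM, hp⟩
    have h2 := hp.two_le
    refine ⟨p.toNat, ?_, by omega⟩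
    rw [List.mem_filter, List.mem_range]
    exact ⟨by omega, by simp [hp]⟩

theorem primesUpTo_neg (n : Int) (h : n < 2) : primesUpTo n = [] := by
  rw [List.eq_nil_iff_forall_not_mem]
  intro p hp
  rw [mem_primesUpTo] at hp
  have := hp.2.2.two_le
  omega

theorem primesUpTo_filter_le (M n : Int) (h : n ≤ M) :
    (primesUpTo M).filter (fun p => decide (p ≤ n)) = primesUpTo n := by
  by_cases hn : n < 0
  · rw [primesUpTo_neg n (by omega), List.filter_eq_nil_iff]
    intro p hp
    rw [mem_primesUpTo] at hp
    have := hp.2.2.two_le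
    simp; omega
  · have key : ∀ k : Nat, (primesUpTo (n + k)).filter (fun p => decide (p ≤ n)) = primesUpTo n := by
      intro k
      induction k with
      | zero =>
        simp only [Nat.cast_zero, add_zero]
        rw [List.filter_eq_self]
        intro p hp
        rw [mem_primesUpTo] at hp
        simp [hp.2.1]
      | succ k ih =>
        have hcast : n + ((k + 1 : Nat) : Int) = (n + k) + 1 := by push_cast; ring
        rw [hcast, primesUpTo_succ (n + k) (by have : (0:Int) ≤ (k:Int) := Int.natCast_nonneg k; omega), List.filter_append, ih]
        have : (if Nat.Prime (n + ↑k + 1).toNat then [n + ↑k + 1] else []).filter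
            (fun p => decide (p ≤ n)) = [] := by
          split <;> simp
        rw [this, List.append_nil]
    have hM : M = n + ((M - n).toNat : Int) := by omega
    rw [hM]; exact key _

theorem pisp (n : ℕ) (h2 : 2 ≤ n) :
    n.Prime ↔ ∀ p : ℕ, p.Prime → p * p ≤ n → ¬ p ∣ n := by
  constructor
  · intro hn p hp hpp hdvd
    rcases (Nat.Prime.eq_one_or_self_of_dvd hn p hdvd) with h | h
    · exact hp.one_lt.ne' h
    · subst h; nlinarith [hp.two_le]
  · intro h
    by_contra hnp
    have hsq : n.minFac * n.minFac ≤ n := by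
      have := Nat.minFac_sq_le_self (show 0 < n by omega) hnp
      nlinarith [this, sq_nonneg n.minFac]
    exact h n.minFac (Nat.minFac_prime (by omega)) hsq (Nat.minFac_dvd n)

theorem trialdiv_eq (num : Int) (h2 : 2 ≤ num) :
    (((primesUpTo (num - 1)).filter (fun p => decide (p * p ≤ num))).all
      (fun p => PySem.Int.mod num p != 0)) = decide (Nat.Prime num.toNat) := by
  have hnum2 : 2 ≤ num.toNat := by omega
  rw [Bool.eq_iff_iff, List.all_eq_true, decide_eq_true_eq, pisp num.toNat hnum2]
  constructor
  · intro h q hq hqq hqdvd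
    have hq2 := hq.two_le
    have hqlt : q < num.toNat := by nlinarith
    have hmem : (q : Int) ∈ (primesUpTo (num - 1)).filter (fun p => decide (p * p ≤ num)) := by
      rw [List.mem_filter, mem_primesUpTo]
      refine ⟨⟨by omega, by omega, by simpa using hq⟩, ?_⟩
      rw [decide_eq_true_eq]
      have : ((q * q : Nat) : Int) ≤ ((num.toNat : Nat) : Int) := by exact_mod_cast hqq
      push_cast at this; omega
    have := h _ hmem
    rw [bne_iff_ne, ne_eq, PySem.Int.mod_eq_zero_iff_dvd] at this
    refine this ?_
    have hd : ((q:Nat):Int) ∣ ((num.toNat:Nat):Int) := Int.natCast_dvd_natCast.mpr hqdvd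
    have hnn : num = (num.toNat : Int) := by omega
    rw [← hnn] at hd; exact hd
  · intro h p hp
    rw [List.mem_filter, mem_primesUpTo, decide_eq_true_eq] at hp
    obtain ⟨⟨hp0, hple, hpprime⟩, hpp⟩ := hp
    rw [bne_iff_ne, ne_eq, PySem.Int.mod_eq_zero_iff_dvd]
    intro hdvd
    have hpn : p = (p.toNat : Int) := by omega
    have hnn : num = (num.toNat : Int) := by omega
    refine h p.toNat hpprime ?_ ?_
    · have : ((p.toNat * p.toNat : Nat) : Int) ≤ ((num.toNat : Nat) : Int) := by
        push_cast; rw [← hpn, ← hnn]; exact hpp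
      exact_mod_cast this
    · rw [hpn, hnn] at hdvd
      exact_mod_cast hdvd
def podd (n : Int) : Bool := PySem.Int.mod (pcRef n) 2 == 1

theorem updateFold (M : Int) (hM : 1 ≤ M) (k : Nat) :
    ((PySem.List.pyRange (M + 1) (M + k + 1) 1).foldl
      (fun ps num =>
        if (ps.filter (fun p => decide (p * p ≤ num))).all
            (fun p => PySem.Int.mod num p != 0)
        then ps ++ [num] else ps) (primesUpTo M)) = primesUpTo (M + k) := by
  induction k with
  | zero => rw [PySem.List.pyRange_one_eq_nil (by omega)]; simp
  | succ k ih =>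
    have hsp : M + ((k + 1 : Nat) : Int) + 1 = (M + k + 1) + 1 := by push_cast; ring
    rw [hsp, PySem.List.pyRange_one_succ_right (by omega), List.foldl_append, ih]
    simp only [List.foldl_cons, List.foldl_nil]
    have hnum2 : (2 : Int) ≤ M + k + 1 := by omega
    have hm1 : M + (k : Int) + 1 - 1 = M + k := by ring
    have ht := trialdiv_eq (M + k + 1) hnum2
    rw [hm1] at ht
    have hc : M + ((k + 1 : Nat) : Int) = (M + k) + 1 := by push_cast; ring
    rw [ht, hc, primesUpTo_succ (M + k) (by omega)]
    by_cases hp : Nat.Prime (M + (k : Int) + 1).toNat <;> simp [hp]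

theorem pvUpdatePrimes_eq (M e : Int) (hM : 1 ≤ M) :
    pvUpdatePrimes (primesUpTo M) M e = (primesUpTo (max M e), max M e) := by
  unfold pvUpdatePrimes
  by_cases h : e > M
  · rw [if_pos h]
    have hmax2 : max 2 (M + 1) = M + 1 := by omega
    have he : e = M + ((e - M).toNat : Int) := by omega
    have hmaxe : max M e = e := by omega
    rw [hmax2, hmaxe]
    conv_lhs => rw [he]
    rw [updateFold M hM (e - M).toNat, ← he]
  · rw [if_neg h]
    have : max M e = M := by omega
    rw [this]

theorem pvGetPrimeCount_eq (M n : Int) (hM : 1 ≤ M) :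
    pvGetPrimeCount (primesUpTo M) M n = ((primesUpTo (max M n), max M n), pcRef n) := by
  unfold pvGetPrimeCount
  rw [pvUpdatePrimes_eq M n hM]
  simp only
  rw [primesUpTo_filter_le (max M n) n (by omega), length_primesUpTo]

def stepA (st : (List Int × Int) × Int × Int) (v : Int) : (List Int × Int) × Int × Int :=
  let r := pvGetPrimeCount st.1.1 st.1.2 v
  if PySem.Int.mod r.2 2 == 0 then (r.1, st.2.1, st.2.2 + 1)
  else (r.1, st.2.1 + 1, st.2.2)

theorem pcRef_nonneg (v : Int) : 0 ≤ pcRef v := by unfold pcRef; positivity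

theorem stepA_cond (v : Int) : (PySem.Int.mod (pcRef v) 2 == 0) = !podd v := by
  unfold podd
  have hpc0 : 0 ≤ pcRef v := pcRef_nonneg v
  rw [PySem.Int.mod_eq_emod_of_pos (show (0:Int) < 2 by omega)]
  have h01 : pcRef v % 2 = 0 ∨ pcRef v % 2 = 1 := by omega
  rcases h01 with h | h <;> simp [h]

theorem stepA_eq (M maria ben v : Int) (hM : 1 ≤ M) :
    stepA ((primesUpTo M, M), maria, ben) v =
      ((primesUpTo (max M v), max M v),
       maria + (if podd v then 1 else 0), ben + (if podd v then 0 else 1)) := by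
  unfold stepA
  simp only [pvGetPrimeCount_eq M v hM, stepA_cond]
  by_cases hv : podd v <;> simp [hv]

theorem mainFoldA (qs : List Int) : ∀ (M maria ben : Int), 1 ≤ M →
    qs.foldl stepA ((primesUpTo M, M), maria, ben)
      = ((primesUpTo (qs.foldl max M), qs.foldl max M),
         maria + ((qs.filter podd).length : Int),
         ben + ((qs.filter (fun v => !podd v)).length : Int)) := by
  induction qs with
  | nil => intro M maria ben hM; simp
  | cons v qs ih =>
    intro M maria ben hM
    rw [List.foldl_cons, stepA_eq M maria ben v hM,
        ih (max M v) _ _ (by omega), List.foldl_cons]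
    refine Prod.ext rfl (Prod.ext ?_ ?_) <;>
      by_cases hv : podd v <;> simp [List.filter_cons, hv] <;> push_cast <;> ring
theorem pisd (n : ℕ) (h2 : 2 ≤ n) :
    n.Prime ↔ ∀ d : ℕ, 2 ≤ d → d * d ≤ n → ¬ d ∣ n := by
  constructor
  · intro hn d hd hdd hdvd
    rcases (Nat.Prime.eq_one_or_self_of_dvd hn d hdvd) with h | h
    · omega
    · subst h; nlinarith
  · intro h
    by_contra hnp
    have hp := Nat.minFac_prime (show n ≠ 1 by omega)
    have hsq : n.minFac * n.minFac ≤ n := by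
      have := Nat.minFac_sq_le_self (show 0 < n by omega) hnp
      nlinarith [this, sq_nonneg n.minFac]
    exact h n.minFac hp.two_le hsq (Nat.minFac_dvd n)

theorem pvIsPrimeGo_iff (n : Int) (hn : 0 ≤ n) : ∀ (fuel : Nat) (d : Int), 2 ≤ d →
    (n + 1 - d).toNat ≤ fuel →
    (pvIsPrimeGo n fuel d = true ↔ ∀ e : Int, d ≤ e → e * e ≤ n → ¬ (e ∣ n)) := by
  intro fuel
  induction fuel with
  | zero =>
    intro d hd hfuel
    simp only [pvIsPrimeGo, true_iff]
    intro e he hee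
    have h1 : n + 1 ≤ d := by omega
    nlinarith
  | succ fuel ih =>
    intro d hd hfuel
    simp only [pvIsPrimeGo]
    by_cases hdd : d * d ≤ n
    · rw [if_pos hdd]
      by_cases hmod : PySem.Int.mod n d == 0
      · rw [if_pos hmod]
        rw [beq_iff_eq, PySem.Int.mod_eq_zero_iff_dvd] at hmod
        constructor
        · intro h; exact absurd h (by simp)
        · intro h; exact absurd hmod (h d le_rfl hdd)
      · rw [if_neg hmod]
        rw [ih (d + 1) (by omega) (by omega)]
        rw [beq_iff_eq, PySem.Int.mod_eq_zero_iff_dvd] at hmod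
        constructor
        · intro h e he hee
          by_cases hed : e = d
          · subst hed; exact fun hc => hmod hc
          · exact h e (by omega) hee
        · intro h e he hee
          exact h e (by omega) hee
    · rw [if_neg hdd]
      simp only [true_iff]
      intro e he hee
      nlinarith

theorem pvIsPrime_eq (n : Int) : pvIsPrime n = decide (Nat.Prime n.toNat) := by
  unfold pvIsPrime
  by_cases h : n < 2
  · rw [if_pos h]
    have h1 : n.toNat = 0 ∨ n.toNat = 1 := by omega
    rcases h1 with h1 | h1 <;> simp [h1, Nat.not_prime_zero, Nat.not_prime_one]
  · rw [if_neg h]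
    have hn2 : 2 ≤ n := by omega
    have hnn : ((n.toNat : Nat) : Int) = n := by omega
    rw [Bool.eq_iff_iff, decide_eq_true_eq,
        pvIsPrimeGo_iff n (by omega) n.toNat 2 (by omega) (by omega),
        pisd n.toNat (by omega)]
    constructor
    · intro h' q hq hqq hqdvd
      refine h' (q : Int) (by exact_mod_cast hq) ?_ ?_
      · have : ((q * q : Nat) : Int) ≤ ((n.toNat : Nat) : Int) := by exact_mod_cast hqq
        push_cast at this; omega
      · rw [← hnn]; exact_mod_cast hqdvd
    · intro h' e he hee hedvd
      have he0 : 0 ≤ e := by omega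
      have hq : e = (e.toNat : Int) := by omega
      refine h' e.toNat (by omega) ?_ ?_
      · have : ((e.toNat * e.toNat : Nat) : Int) ≤ ((n.toNat : Nat) : Int) := by
          push_cast; rw [← hq, hnn]; exact hee
        exact_mod_cast this
      · rw [hq, ← hnn] at hedvd
        exact_mod_cast hedvd

def stepB (st : List Int × Int) (i : Int) : List Int × Int :=
  let cnt := if pvIsPrime i then st.2 + 1 else st.2
  (st.1 ++ [cnt], cnt)

theorem tableFold_aux (k : Nat) :
    ((PySem.List.pyRange 2 ((1 + k) + 1) 1).foldl stepB ([0, 0], 0)) =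
      ([0, 0] ++ (PySem.List.pyRange 2 ((1 + k) + 1) 1).map pcRef, pcRef (1 + k)) := by
  induction k with
  | zero =>
    rw [PySem.List.pyRange_one_eq_nil (by omega)]
    simp [pcRef_lt_two 1 (by omega)]
  | succ k ih =>
    have hc : (1 + ((k + 1 : Nat) : Int)) + 1 = ((1 + k) + 1) + 1 := by push_cast; ring
    rw [hc, PySem.List.pyRange_one_succ_right (by omega), List.foldl_append, ih,
        List.map_append]
    simp only [List.foldl_cons, List.foldl_nil, List.map_cons, List.map_nil]
    unfold stepB
    rw [pvIsPrime_eq]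
    have hpc := pcRef_succ (1 + k) (by omega)
    have harg : (1 : Int) + ((k : Int) + 1) = 1 + (k : Int) + 1 := by ring
    simp only
    by_cases hp : Nat.Prime ((1 + (k : Int)) + 1).toNat
    · rw [if_pos hp] at hpc
      simp [hp, hpc, harg]
    · rw [if_neg hp] at hpc
      simp [hp, hpc, harg]

theorem tableFold (m : Int) :
    ((PySem.List.pyRange 2 (m + 1) 1).foldl stepB ([0, 0], 0)).1
      = [0, 0] ++ (PySem.List.pyRange 2 (m + 1) 1).map pcRef := by
  by_cases hm : m ≤ 1
  · rw [PySem.List.pyRange_one_eq_nil (by omega)]; simp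
  · have : m = 1 + ((m - 1).toNat : Int) := by omega
    rw [this, tableFold_aux]

theorem tableFold_inline (m : Int) :
    ((PySem.List.pyRange 2 (m + 1) 1).foldl
      (fun (st : List Int × Int) i =>
        (st.1 ++ [if pvIsPrime i then st.2 + 1 else st.2],
         if pvIsPrime i then st.2 + 1 else st.2)) ([0, 0], 0)).1
      = [0, 0] ++ (PySem.List.pyRange 2 (m + 1) 1).map pcRef := tableFold m

theorem table_lookup (m n : Int) (h2 : 2 ≤ n) (hm : n ≤ m) :
    PySem.List.pyGetD ([0, 0] ++ (PySem.List.pyRange 2 (m + 1) 1).map pcRef) n 0 = pcRef n := by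
  have hlen : (PySem.List.pyRange 2 (m + 1) 1).length = (m - 1).toNat :=
    by rw [PySem.List.length_pyRange_one]; omega
  rw [PySem.List.pyGetD_eq_getElem _ 0 (by omega) (by simp [hlen]; push_cast; omega)]
  rw [List.getElem_append_right (by simp; omega)]
  simp only [List.length_cons, List.length_nil, List.getElem_map]
  rw [PySem.List.getElem_pyRange_one]
  have : (2 : Int) + ((n.toNat - (0 + 1 + 1) : Nat) : Int) = n := by push_cast; omega
  rw [this]

theorem length_filter_split (l : List Int) (p : Int → Bool) :
    (l.filter p).length + (l.filter (fun a => !p a)).length = l.length := by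
  induction l with
  | nil => simp
  | cons a l ih => by_cases h : p a <;> simp [h, ih] <;> omega

def runA (x : Int) (nums : List Int) : (List Int × Int) × Int × Int :=
  (PySem.List.pyRange 0 x 1).foldl
    (fun st n => stepA st (PySem.List.pyGetD nums n 0)) (([], 1), 0, 0)

theorem isWinner_eq (x : Int) (nums : List Int) :
    isWinner x nums =
      (if (runA x nums).2.1 > (runA x nums).2.2 then some "Maria"
       else if (runA x nums).2.2 > (runA x nums).2.1 then some "Ben" else none) := rfl

theorem podd_of_lt_two (n : Int) (h : n < 2) : podd n = false := by
  unfold podd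
  rw [pcRef_lt_two n h]
  decide


-- ===== VERDICT (by name: the statement is the Claim_ definition above) =====
theorem isWinner_spec : Claim_equal_isWinner := by
  intro x nums _ hpre
  unfold Pre_isWinner at hpre
  unfold Spec_isWinner
  rw [isWinner_eq]
  unfold isWinner_alt
  by_cases hx : x ≤ 0
  · have hq : ¬ (x > 0) := by omega
    have hr : PySem.List.pyRange 0 x 1 = [] := PySem.List.pyRange_one_eq_nil (by omega)
    simp only [hq, if_false, List.isEmpty_nil, if_true, runA, hr, List.foldl_nil]
    norm_num
  · have hx0 : 0 < x := by omega
    set qs := nums.take x.toNat with hqs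
    have hlq : (qs.length : Int) = x := by
      rw [hqs, List.length_take]; omega
    -- A side
    have hA : runA x nums = ((primesUpTo (qs.foldl max 1), qs.foldl max 1),
        0 + ((qs.filter podd).length : Int),
        0 + ((qs.filter (fun v => !podd v)).length : Int)) := by
      unfold runA
      rw [PySem.List.foldl_congr_mem _ _
          (fun st n => stepA st (PySem.List.pyGetD qs n 0)) _ ?_]
      · rw [← hlq, PySem.List.foldl_pyRange_zero_pyGetD' qs 0 stepA]
        exact mainFoldA qs 1 0 0 (by omega)
      · intro acc n hn
        rw [PySem.List.mem_pyRange_one] at hn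
        congr 1
        rw [PySem.List.pyGetD_eq_getElem _ 0 (by omega) (by omega),
            PySem.List.pyGetD_eq_getElem _ 0 (by omega) (by rw [← hlq] at hn; exact_mod_cast hn.2)]
        simp [hqs]
    -- B side
    have hslice : PySem.List.slice nums none (some x) = qs := by
      rw [PySem.List.slice_to nums (by omega), hqs]
    have hne : qs ≠ [] := by
      intro h
      rw [h] at hlq
      simp at hlq
      omega
    simp only [if_pos hx0, hslice]
    have hnotempty : ¬ (qs.isEmpty = true) := by simpa using hne
    rw [if_neg hnotempty]
    obtain ⟨a, l, hal⟩ := List.exists_cons_of_ne_nil hne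
    have hmax : (PySem.List.max? qs fun y => y).getD 0 = l.foldl max a := by
      rw [hal, PySem.List.max?_id_cons]; rfl
    set m := l.foldl max a with hm
    have hmem_le : ∀ y ∈ qs, y ≤ m := by
      intro y hy
      have := PySem.List.max?_isMax (by rw [hal, PySem.List.max?_id_cons]) y hy
      simpa using this
    rw [hmax]
    rw [tableFold_inline m]
    have hfilter : qs.filter
        (fun n => decide (2 ≤ n) &&
          (PySem.Int.mod (PySem.List.pyGetD
            ([0, 0] ++ (PySem.List.pyRange 2 (m + 1) 1).map pcRef) n 0) 2 == 1))
        = qs.filter podd := by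
      apply List.filter_congr
      intro n hn
      by_cases h2 : 2 ≤ n
      · rw [table_lookup m n h2 (hmem_le n hn)]
        simp [h2, podd]
      · simp [h2, podd_of_lt_two n (by omega)]
    rw [hfilter, hA]
    have hsplit := length_filter_split qs podd
    have heq1 : (0 : Int) + ((qs.filter podd).length : Int) = ((qs.filter podd).length : Int) := by ring
    have heq2 : (0 : Int) + ((qs.filter (fun v => !podd v)).length : Int)
        = (qs.length : Int) - ((qs.filter podd).length : Int) := by
      have : ((qs.filter podd).length : Int) + ((qs.filter (fun v => !podd v)).length : Int)
          = (qs.length : Int) := by exact_mod_cast hsplit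
      omega
    simp only [heq1, heq2]
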